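-- pv_equiv track=rewrite | github.com/girishji/EPIJudge | epi_judge_python/smallest_subarray_covering_all_values.py | find_smallest_sequentially_covering_subset
-- ===== SOURCE A (Python) =====
-- import collections
-- from typing import List
--
-- Subarray = collections.namedtuple("Subarray", ("start", "end"))
--
-- def find_smallest_sequentially_covering_subset(
--     paragraph: List[str], keywords: List[str]
-- ) -> Subarray:
--     sta, end = -1, len(paragraph)
--     kw2 = 0
--     for i, w in enumerate(paragraph):
--         if w != keywords[0]:
--             continue
--         st = i
--         if st < kw2:
--             sta = st
--             continue
--         idx, kw = i + 1, 1
--         while kw < len(keywords) and idx < len(paragraph):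
--             if keywords[kw] == paragraph[idx]:
--                 kw2temp = idx if kw == 1 else 0
--                 kw += 1
--                 if kw == len(keywords):
--                     en = idx
--                     if en - st < end - sta:
--                         kw2 = kw2temp
--                         sta, end = st, en
--                     break
--             idx += 1
--
--     return Subarray(sta, end)
-- ===== SOURCE B (Python) =====
-- import collections
--
-- Subarray = collections.namedtuple("Subarray", ("start", "end"))
--
-- def find_smallest_sequentially_covering_subset(paragraph, keywords):
--     # One backward pass: chain_end[j] = end index of the greedy (earliest) match of
--     # keywords[j:] inside the suffix strictly to the right of the current position.
--     n, k = len(paragraph), len(keywords)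
--     chain_end = [None] * k
--     sta, end = -1, n
--     for i in range(n - 1, -1, -1):
--         w = paragraph[i]
--         if k > 0 and w == keywords[0]:
--             e = i if k == 1 else chain_end[1]
--             if e is not None and e - i <= end - sta:
--                 sta, end = i, e
--         chain_end = [(i if j == k - 1 else chain_end[j + 1]) if w == keywords[j] else chain_end[j]
--                      for j in range(k)]
--     return Subarray(sta, end)
-- ===== Notes on version B (the rewrite author's own statement) =====
-- stated objective: faster
-- what changed: A rescans forward from every occurrence of keywords[0] to greedily match the remaining keywords; B makes a single backward pass maintaining, per keyword index j, the end of the greedy match of keywords[j:] in the suffix to the right, so each candidate window is read off in O(1).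
-- intended difference: On single-keyword inputs whose keyword occurs in the paragraph, A's inner loop can never complete (it starts with kw = 1 = len(keywords)), so A returns the no-match sentinel (-1, len(paragraph)); B returns the intended one-word window (i, i) at the first occurrence. — e.g. on find_smallest_sequentially_covering_subset(["a"], ["a"]): A returns (-1, 1), B returns (0, 0)
import Mathlib
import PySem

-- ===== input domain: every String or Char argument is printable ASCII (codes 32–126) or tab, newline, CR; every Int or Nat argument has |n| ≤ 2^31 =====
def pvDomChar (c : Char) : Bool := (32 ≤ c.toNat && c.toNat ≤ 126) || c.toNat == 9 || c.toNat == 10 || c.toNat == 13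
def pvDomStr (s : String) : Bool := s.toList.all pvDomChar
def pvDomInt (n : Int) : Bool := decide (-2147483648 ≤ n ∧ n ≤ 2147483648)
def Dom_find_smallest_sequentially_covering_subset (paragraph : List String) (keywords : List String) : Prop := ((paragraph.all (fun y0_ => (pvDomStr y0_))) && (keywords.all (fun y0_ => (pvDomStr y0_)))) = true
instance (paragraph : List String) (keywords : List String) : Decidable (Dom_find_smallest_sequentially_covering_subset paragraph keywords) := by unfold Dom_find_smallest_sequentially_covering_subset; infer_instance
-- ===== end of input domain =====

-- B replaces A's forward rescan from every occurrence of keywords[0] by ONE backward pass that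
-- maintains, per keyword index, the end of the greedy chain in the suffix to the right (objective:
-- faster; the speed label is whatever a timing run recorded). On one-keyword inputs A never
-- records a match (stated as D_) and B returns the intended first occurrence.

-- ===== PORT A =====
-- inner 'while kw < len(keywords) and idx < len(paragraph)' loop of A; returns (en, kw2temp) on break
def aInner (paragraph keywords : List String) (kw idx kw2t : Nat) : Option (Nat × Nat) :=
  if h : kw < keywords.length ∧ idx < paragraph.length then
    if keywords.getD kw "" = paragraph.getD idx "" then
      let kw2t' := if kw = 1 then idx else 0
      if kw + 1 = keywords.length then some (idx, kw2t')
      else aInner paragraph keywords (kw + 1) (idx + 1) kw2t'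
    else aInner paragraph keywords kw (idx + 1) kw2t
  else none
termination_by paragraph.length - idx
decreasing_by all_goals omega

-- the 'for i, w in enumerate(paragraph)' loop of A
def aLoop (paragraph keywords : List String) (items : List (Int × String)) (sta end_ kw2 : Int) : Int × Int :=
  match items with
  | [] => (sta, end_)
  | (i, w) :: rest =>
    -- 'w != keywords[0]' raises IndexError when keywords == []: that case is excluded by Pre_
    if w ≠ keywords.headD "" then aLoop paragraph keywords rest sta end_ kw2
    else if i < kw2 then aLoop paragraph keywords rest i end_ kw2
    else
      -- enumerate indices are nonnegative, so '(i+1).toNat' is exactly Python's 'i + 1'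
      match aInner paragraph keywords 1 (i + 1).toNat 0 with
      | some (en, kw2t) =>
        if (en : Int) - i < end_ - sta then aLoop paragraph keywords rest i (en : Int) (kw2t : Int)
        else aLoop paragraph keywords rest sta end_ kw2
      | none => aLoop paragraph keywords rest sta end_ kw2

def find_smallest_sequentially_covering_subset (paragraph : List String) (keywords : List String) : Int × Int :=
  aLoop paragraph keywords (PySem.List.enumerate paragraph 0) (-1) (paragraph.length : Int) 0

-- ===== PORT B =====
-- backward pass of Source B: processes the tail (the suffix to the right) first; first component is
-- chain_end, second is the running best (sta, end)
def bRec (keywords : List String) (n : Nat) : List String → Nat → List (Option Nat) × (Int × Int)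
  | [], _ => (List.replicate keywords.length none, (-1, (n : Int)))
  | w :: rest, i =>
    let r := bRec keywords n rest (i + 1)
    let E := r.1
    let best := r.2
    let k := keywords.length
    let best' :=
      if 0 < k ∧ w = keywords.headD "" then
        match (if k = 1 then some i else E.getD 1 none) with
        | some e => if (e : Int) - (i : Int) ≤ best.2 - best.1 then ((i : Int), (e : Int)) else best
        | none => best
      else best
    let E' := (List.range k).map (fun j =>
      if w = keywords.getD j "" then (if j = k - 1 then some i else E.getD (j + 1) none)
      else E.getD j none)
    (E', best')

def find_smallest_sequentially_covering_subset_alt (paragraph : List String) (keywords : List String) : Int × Int :=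
  (bRec keywords paragraph.length paragraph 0).2

-- ===== PRECONDITION & SPEC =====
-- Pre_ excludes only keywords == [] with a nonempty paragraph, where A raises IndexError on 'keywords[0]'
def Pre_find_smallest_sequentially_covering_subset (paragraph : List String) (keywords : List String) : Prop :=
  keywords ≠ [] ∨ paragraph = []
instance (paragraph : List String) (keywords : List String) : Decidable (Pre_find_smallest_sequentially_covering_subset paragraph keywords) := by unfold Pre_find_smallest_sequentially_covering_subset; infer_instance

def pvWitness_find_smallest_sequentially_covering_subset : List String × List String :=
  (["a", "b", "a", "c", "b"], ["a", "b"])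

-- On single-keyword inputs whose keyword occurs in the paragraph, A's inner loop can never complete
-- (kw starts at 1 = len(keywords)), so A returns the no-match sentinel (-1, len(paragraph)); B returns
-- the intended one-word window (i, i) at the first occurrence.
def D_find_smallest_sequentially_covering_subset (paragraph : List String) (keywords : List String) : Prop :=
  keywords.length = 1 ∧ keywords.headD "" ∈ paragraph
instance (paragraph : List String) (keywords : List String) : Decidable (D_find_smallest_sequentially_covering_subset paragraph keywords) := by unfold D_find_smallest_sequentially_covering_subset; infer_instance

def Spec_find_smallest_sequentially_covering_subset (paragraph : List String) (keywords : List String) (out : Int × Int) : Prop :=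
  ¬ D_find_smallest_sequentially_covering_subset paragraph keywords → out = find_smallest_sequentially_covering_subset_alt paragraph keywords
instance (paragraph : List String) (keywords : List String) (out : Int × Int) : Decidable (Spec_find_smallest_sequentially_covering_subset paragraph keywords out) := by unfold Spec_find_smallest_sequentially_covering_subset; infer_instance

def pvDiffWitness_find_smallest_sequentially_covering_subset : List String × List String := (["a"], ["a"])
def pvDiffWitnessOut_find_smallest_sequentially_covering_subset : (Int × Int) × (Int × Int) := ((-1, 1), (0, 0))

-- ===== CLAIM (what is proved, stated in full; the proofs are below) =====
def Claim_unchanged_find_smallest_sequentially_covering_subset : Prop := ∀ (paragraph : List String) (keywords : List String), Dom_find_smallest_sequentially_covering_subset paragraph keywords → Pre_find_smallest_sequentially_covering_subset paragraph keywords → Spec_find_smallest_sequentially_covering_subset paragraph keywords (find_smallest_sequentially_covering_subset paragraph keywords)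
def Claim_changed_find_smallest_sequentially_covering_subset : Prop := Dom_find_smallest_sequentially_covering_subset (pvDiffWitness_find_smallest_sequentially_covering_subset.1) (pvDiffWitness_find_smallest_sequentially_covering_subset.2) ∧ Pre_find_smallest_sequentially_covering_subset (pvDiffWitness_find_smallest_sequentially_covering_subset.1) (pvDiffWitness_find_smallest_sequentially_covering_subset.2) ∧ D_find_smallest_sequentially_covering_subset (pvDiffWitness_find_smallest_sequentially_covering_subset.1) (pvDiffWitness_find_smallest_sequentially_covering_subset.2) ∧ find_smallest_sequentially_covering_subset (pvDiffWitness_find_smallest_sequentially_covering_subset.1) (pvDiffWitness_find_smallest_sequentially_covering_subset.2) = pvDiffWitnessOut_find_smallest_sequentially_covering_subset.1 ∧ find_smallest_sequentially_covering_subset_alt (pvDiffWitness_find_smallest_sequentially_covering_subset.1) (pvDiffWitness_find_smallest_sequentially_covering_subset.2) = pvDiffWitnessOut_find_smallest_sequentially_covering_subset.2 ∧ pvDiffWitnessOut_find_smallest_sequentially_covering_subset.1 ≠ pvDiffWitnessOut_find_smallest_sequentially_covering_subset.2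
def Claim_exact_find_smallest_sequentially_covering_subset : Prop := ∀ (paragraph : List String) (keywords : List String), Dom_find_smallest_sequentially_covering_subset paragraph keywords → Pre_find_smallest_sequentially_covering_subset paragraph keywords → D_find_smallest_sequentially_covering_subset paragraph keywords → find_smallest_sequentially_covering_subset paragraph keywords ≠ find_smallest_sequentially_covering_subset_alt paragraph keywords

-- ===== LEMMAS AND PROOFS =====

-- greedy earliest end of matching ks as a subsequence of ws (ws = a suffix of the paragraph
-- whose head sits at absolute index i); none = no match
def gEnd : List String → List String → Nat → Option Nat
  | _, [], _ => none
  | [], _ :: _, _ => none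
  | kk :: ks, w :: ws, i =>
    if w = kk then (if ks = [] then some i else gEnd ks ws (i + 1))
    else gEnd (kk :: ks) ws (i + 1)

-- the candidate windows (start, greedy end), in increasing start order
def cands (k0 : String) (ks1 : List String) : List String → Nat → List (Int × Int)
  | [], _ => []
  | w :: rest, i =>
    (if w = k0 then
      (match gEnd ks1 rest (i + 1) with
       | some e => [((i : Int), (e : Int))]
       | none => []) else []) ++ cands k0 ks1 rest (i + 1)

-- leftmost window of minimal length
def bestM : List (Int × Int) → Option (Int × Int)
  | [] => none
  | c :: C =>
    match bestM C with
    | none => some c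
    | some m => if m.2 - m.1 < c.2 - c.1 then some m else some c

def fA (b c : Int × Int) : Int × Int := if c.2 - c.1 < b.2 - b.1 then c else b

-- how the final state is read off from the leftmost minimal candidate
def pickA (b : Int × Int) : Option (Int × Int) → Int × Int
  | none => b
  | some m => if m.2 - m.1 < b.2 - b.1 then m else b

def pickB (n : Nat) : Option (Int × Int) → Int × Int
  | none => (-1, (n : Int))
  | some m => if m.2 - m.1 ≤ (n : Int) - (-1) then m else (-1, (n : Int))

def Rf (n : Nat) : List (Int × Int) → Int × Int
  | [] => (-1, (n : Int))
  | c :: C => let b := Rf n C; if c.2 - c.1 ≤ b.2 - b.1 then c else b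

theorem gEnd_nil_right : ∀ (ks : List String) (i : Nat), gEnd ks [] i = none := by
  intro ks i; cases ks <;> rfl

theorem gEnd_nil_left : ∀ (ws : List String) (i : Nat), gEnd [] ws i = none := by
  intro ws i; cases ws <;> rfl

theorem gEnd_bound : ∀ (ks ws : List String) (i e : Nat), gEnd ks ws i = some e → i ≤ e ∧ e < i + ws.length := by
  intro ks ws
  induction ws generalizing ks with
  | nil => intro i e h; cases ks <;> simp [gEnd] at h
  | cons w ws ih =>
    intro i e h
    cases ks with
    | nil => simp [gEnd] at h
    | cons kk ks =>
      rw [gEnd] at h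
      by_cases hw : w = kk
      · rw [if_pos hw] at h
        by_cases hk : ks = []
        · rw [if_pos hk] at h
          injection h with h; subst h; simp
        · rw [if_neg hk] at h
          have := ih ks (i + 1) e h
          simp only [List.length_cons]; omega
      · rw [if_neg hw] at h
        have := ih (kk :: ks) (i + 1) e h
        simp only [List.length_cons]; omega

theorem gEnd_single_iff (x : String) (para : List String) : ∀ (p e : Nat),
    gEnd [x] (para.drop p) p = some e ↔
      (p ≤ e ∧ e < para.length ∧ para.getD e "" = x ∧ ∀ q, p ≤ q → q < e → para.getD q "" ≠ x) := by
  suffices H : ∀ (fuel p e : Nat), para.length - p ≤ fuel →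
      (gEnd [x] (para.drop p) p = some e ↔
        (p ≤ e ∧ e < para.length ∧ para.getD e "" = x ∧ ∀ q, p ≤ q → q < e → para.getD q "" ≠ x)) by
    intro p e; exact H para.length p e (by omega)
  intro fuel
  induction fuel with
  | zero =>
    intro p e hf
    rw [List.drop_eq_nil_of_le (by omega), gEnd_nil_right]
    constructor
    · intro h; cases h
    · rintro ⟨h1, h2, -, -⟩; omega
  | succ fuel ih =>
    intro p e hf
    by_cases hp : p < para.length
    · rw [List.drop_eq_getElem_cons hp, gEnd]
      by_cases hx : para[p] = x
      · rw [if_pos hx, if_pos rfl]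
        constructor
        · intro h
          injection h with h; subst h
          refine ⟨le_refl _, hp, by rw [List.getD_eq_getElem _ _ hp]; exact hx, ?_⟩
          intro q hq1 hq2; omega
        · rintro ⟨h1, h2, h3, h4⟩
          by_cases he : e = p
          · subst he; rfl
          · exfalso
            exact h4 p (le_refl _) (by omega) (by rw [List.getD_eq_getElem _ _ hp]; exact hx)
      · rw [if_neg hx, ih (p + 1) e (by omega)]
        constructor
        · rintro ⟨h1, h2, h3, h4⟩
          refine ⟨by omega, h2, h3, ?_⟩
          intro q hq1 hq2
          by_cases hq : q = p
          · subst hq; rw [List.getD_eq_getElem _ _ hp]; exact hx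
          · exact h4 q (by omega) hq2
        · rintro ⟨h1, h2, h3, h4⟩
          have hep : e ≠ p := by
            intro he; subst he
            rw [List.getD_eq_getElem _ _ hp] at h3; exact hx h3
          exact ⟨by omega, h2, h3, fun q hq1 hq2 => h4 q (by omega) hq2⟩
    · rw [List.drop_eq_nil_of_le (by omega), gEnd_nil_right]
      constructor
      · intro h; cases h
      · rintro ⟨h1, h2, -, -⟩; omega

theorem aInner_char (para ks : List String) : ∀ (idx kw t : Nat), 1 ≤ kw →
    aInner para ks kw idx t =
      (gEnd (ks.drop kw) (para.drop idx) idx).map (fun en => (en, if ks.length = 2 then en else 0)) := by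
  suffices H : ∀ (fuel idx kw t : Nat), para.length - idx ≤ fuel → 1 ≤ kw →
      aInner para ks kw idx t =
        (gEnd (ks.drop kw) (para.drop idx) idx).map (fun en => (en, if ks.length = 2 then en else 0)) by
    intro idx kw t hkw; exact H para.length idx kw t (by omega) hkw
  intro fuel
  induction fuel with
  | zero =>
    intro idx kw t hf hkw
    rw [aInner, dif_neg (by omega), List.drop_eq_nil_of_le (as := para) (by omega), gEnd_nil_right]
    rfl
  | succ fuel ih =>
    intro idx kw t hf hkw
    by_cases hidx : idx < para.length
    · by_cases hkwl : kw < ks.length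
      · rw [aInner, dif_pos ⟨hkwl, hidx⟩]
        rw [List.drop_eq_getElem_cons hidx, List.drop_eq_getElem_cons hkwl, gEnd]
        rw [List.getD_eq_getElem _ _ hkwl, List.getD_eq_getElem _ _ hidx]
        by_cases heq : ks[kw] = para[idx]
        · rw [if_pos heq, if_pos heq.symm]
          by_cases hlast : kw + 1 = ks.length
          · rw [if_pos hlast, if_pos (List.drop_eq_nil_of_le (by omega))]
            simp only [Option.map_some]
            have : (kw = 1) ↔ (ks.length = 2) := by omega
            by_cases h1 : kw = 1
            · rw [if_pos h1, if_pos (this.mp h1)]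
            · rw [if_neg h1, if_neg (fun h2 => h1 (this.mpr h2))]
          · rw [if_neg hlast, if_neg (show ¬(ks.drop (kw + 1) = []) from by
              intro hnil
              have := List.drop_eq_nil_iff.mp hnil
              omega)]
            exact ih (idx + 1) (kw + 1) _ (by omega) (by omega)
        · rw [if_neg heq, if_neg (fun h => heq h.symm)]
          rw [← List.drop_eq_getElem_cons hkwl]
          exact ih (idx + 1) kw t (by omega) hkw
      · rw [aInner, dif_neg (by omega), List.drop_eq_nil_of_le (as := ks) (by omega), gEnd_nil_left]
        rfl
    · rw [aInner, dif_neg (by omega), List.drop_eq_nil_of_le (as := para) (by omega), gEnd_nil_right]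
      rfl

theorem bRec_fst (ks : List String) (n : Nat) : ∀ (ws : List String) (i : Nat),
    (bRec ks n ws i).1 = (List.range ks.length).map (fun j => gEnd (ks.drop j) ws i) := by
  intro ws
  induction ws with
  | nil =>
    intro i
    rw [bRec]
    have : (List.range ks.length).map (fun j => gEnd (ks.drop j) ([] : List String) i) =
        (List.range ks.length).map (fun _ => (none : Option Nat)) :=
      List.map_congr_left (fun j _ => gEnd_nil_right _ _)
    rw [this, List.map_const', List.length_range]
  | cons w rest ih =>
    intro i
    rw [bRec]
    simp only
    refine List.map_congr_left ?_
    intro j hj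
    have hj' : j < ks.length := List.mem_range.mp hj
    have hdk : ks.drop j = ks[j] :: ks.drop (j + 1) := List.drop_eq_getElem_cons hj'
    rw [ih (i + 1), List.getD_eq_getElem _ _ hj', hdk, gEnd]
    by_cases hw : w = ks[j]
    · rw [if_pos hw, if_pos hw]
      by_cases hl : j = ks.length - 1
      · rw [if_pos hl, if_pos (List.drop_eq_nil_of_le (as := ks) (by omega))]
      · rw [if_neg hl, if_neg (show ¬(ks.drop (j + 1) = []) from by
          intro hnil; have := List.drop_eq_nil_iff.mp hnil; omega)]
        rw [PySem.List.getD_map_range _ _ _ _ (by omega)]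
    · rw [if_neg hw, if_neg hw]
      rw [PySem.List.getD_map_range _ _ _ _ hj', ← hdk]

theorem bRec_snd (k0 : String) (ks1 : List String) (hne : ks1 ≠ []) (n : Nat) :
    ∀ (ws : List String) (i : Nat),
    (bRec (k0 :: ks1) n ws i).2 = Rf n (cands k0 ks1 ws i) := by
  have hK : 1 < (k0 :: ks1).length := by
    cases ks1 with
    | nil => exact absurd rfl hne
    | cons a l => simp
  intro ws
  induction ws with
  | nil => intro i; rw [bRec, cands, Rf]
  | cons w rest ih =>
    intro i
    rw [bRec, cands]
    simp only [List.headD_cons]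
    by_cases hw : w = k0
    · rw [if_pos ⟨by simp, hw⟩, if_pos hw]
      rw [if_neg (show ¬((k0 :: ks1).length = 1) from by omega)]
      have hE : (bRec (k0 :: ks1) n rest (i + 1)).1.getD 1 none = gEnd ks1 rest (i + 1) := by
        rw [bRec_fst, PySem.List.getD_map_range _ _ _ _ hK]; rfl
      rw [hE]
      cases hg : gEnd ks1 rest (i + 1) with
      | none => simpa using ih (i + 1)
      | some e =>
        simp only [List.singleton_append, Rf]
        rw [← ih (i + 1)]
    · rw [if_neg (fun h => hw h.2), if_neg hw]
      simpa using ih (i + 1)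

theorem bestM_mem : ∀ (C : List (Int × Int)) (m : Int × Int), bestM C = some m → m ∈ C := by
  intro C
  induction C with
  | nil => intro m h; simp [bestM] at h
  | cons c C ih =>
    intro m h
    cases hC : bestM C with
    | none =>
      simp only [bestM, hC] at h
      injection h with h; subst h; exact List.mem_cons_self
    | some m' =>
      simp only [bestM, hC] at h
      by_cases hlt : m'.2 - m'.1 < c.2 - c.1
      · rw [if_pos hlt] at h; injection h with h; subst h
        exact List.mem_cons_of_mem _ (ih _ hC)
      · rw [if_neg hlt] at h; injection h with h; subst h; exact List.mem_cons_self

theorem cands_bound (k0 : String) (ks1 : List String) : ∀ (ws : List String) (i : Nat) (c : Int × Int),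
    c ∈ cands k0 ks1 ws i → (i : Int) ≤ c.1 ∧ c.1 < c.2 ∧ c.2 < (i : Int) + ws.length := by
  intro ws
  induction ws with
  | nil => intro i c hc; simp [cands] at hc
  | cons w rest ih =>
    intro i c hc
    rw [cands] at hc
    rcases List.mem_append.mp hc with h | h
    · by_cases hw : w = k0
      · rw [if_pos hw] at h
        cases hg : gEnd ks1 rest (i + 1) with
        | none => rw [hg] at h; simp at h
        | some e =>
          rw [hg] at h
          simp only [List.mem_singleton] at h
          subst h
          have := gEnd_bound ks1 rest (i + 1) e hg
          simp only [List.length_cons]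
          constructor
          · exact le_refl _
          · constructor <;> push_cast <;> omega
      · rw [if_neg hw] at h; simp at h
    · have := ih (i + 1) c h
      simp only [List.length_cons]
      push_cast at this ⊢
      omega

theorem foldl_fA : ∀ (C : List (Int × Int)) (b : Int × Int),
    List.foldl fA b C = pickA b (bestM C) := by
  intro C
  induction C with
  | nil => intro b; simp [bestM, pickA]
  | cons c C ih =>
    intro b
    rw [List.foldl_cons, ih (fA b c)]
    cases hC : bestM C with
    | none => simp [bestM, hC, fA, pickA]
    | some m =>
      simp only [bestM, hC, fA]
      by_cases h1 : m.2 - m.1 < c.2 - c.1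
      · rw [if_pos h1]
        simp only [pickA]
        split_ifs <;> first | rfl | (exfalso; omega)
      · rw [if_neg h1]
        simp only [pickA]
        split_ifs <;> first | rfl | (exfalso; omega)

theorem Rf_eq (n : Nat) : ∀ (C : List (Int × Int)),
    Rf n C = pickB n (bestM C) := by
  intro C
  induction C with
  | nil => simp [Rf, bestM, pickB]
  | cons c C ih =>
    rw [Rf, ih]
    cases hC : bestM C with
    | none => simp [bestM, hC, pickB]
    | some m =>
      simp only [bestM, hC]
      by_cases h1 : m.2 - m.1 < c.2 - c.1
      · rw [if_pos h1]
        simp only [pickB]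
        split_ifs <;> first | rfl | (exfalso; omega)
      · rw [if_neg h1]
        simp only [pickB]
        split_ifs <;> first | rfl | (exfalso; omega)

-- the invariant carried by A's outer loop
def aInv (para : List String) (ks1 : List String) (i : Nat) (sta end_ kw2 : Int) : Prop :=
  kw2 = 0 ∨ (ks1.length = 1 ∧ ∃ s e2 : Nat, sta = (s : Int) ∧ kw2 = (e2 : Int) ∧ end_ = (e2 : Int) ∧
    s < i ∧ gEnd ks1 (para.drop (s + 1)) (s + 1) = some e2)

theorem aInv_mono (para ks1 : List String) (i : Nat) (sta end_ kw2 : Int)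
    (h : aInv para ks1 i sta end_ kw2) : aInv para ks1 (i + 1) sta end_ kw2 := by
  rcases h with h | ⟨hl, s, e2, h1, h2, h3, h4, h5⟩
  · exact Or.inl h
  · exact Or.inr ⟨hl, s, e2, h1, h2, h3, by omega, h5⟩

theorem aLoop_eq (para : List String) (k0 : String) (ks1 : List String) (hne : ks1 ≠ []) :
    ∀ (ws : List String) (i : Nat) (sta end_ kw2 : Int), para.drop i = ws →
      aInv para ks1 i sta end_ kw2 →
      aLoop para (k0 :: ks1) (PySem.List.enumerate ws (i : Int)) sta end_ kw2 =
        List.foldl fA (sta, end_) (cands k0 ks1 ws i) := by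
  intro ws
  induction ws with
  | nil =>
    intro i sta end_ kw2 _ _
    rw [PySem.List.enumerate_nil, aLoop, cands, List.foldl_nil]
  | cons w rest ih =>
    intro i sta end_ kw2 hdrop hinv
    have hdrop' : para.drop (i + 1) = rest := by
      have h := List.drop_drop (i := 1) (j := i) (l := para)
      rw [hdrop] at h
      simpa using h.symm
    have hcast : ((i : Int) + 1) = ((i + 1 : Nat) : Int) := by push_cast; ring
    rw [PySem.List.enumerate_cons, aLoop, cands]
    simp only [List.headD_cons]
    by_cases hw : w = k0
    · rw [if_neg (by simp [hw]), if_pos hw]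
      by_cases hsc : (i : Int) < kw2
      · rw [if_pos hsc]
        rcases hinv with h0 | ⟨hlen1, s, e2, hsta, hkw2, hend, hsi, hg⟩
        · exfalso; rw [h0] at hsc; omega
        · obtain ⟨x, hx⟩ : ∃ x, ks1 = [x] := by
            cases ks1 with
            | nil => simp at hlen1
            | cons a t =>
              cases t with
              | nil => exact ⟨a, rfl⟩
              | cons b t' => simp at hlen1
          have hie2 : i < e2 := by rw [hkw2] at hsc; exact_mod_cast hsc
          have hshift : gEnd ks1 (para.drop (i + 1)) (i + 1) = some e2 := by
            rw [hx] at hg ⊢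
            rw [gEnd_single_iff] at hg ⊢
            obtain ⟨g1, g2, g3, g4⟩ := hg
            exact ⟨by omega, g2, g3, fun q hq1 hq2 => g4 q (by omega) hq2⟩
          have hshift' : gEnd ks1 rest (i + 1) = some e2 := by rw [← hdrop']; exact hshift
          rw [hshift']
          simp only [List.singleton_append]
          rw [List.foldl_cons]
          have hfa : fA (sta, end_) ((i : Int), (e2 : Int)) = ((i : Int), (e2 : Int)) := by
            simp only [fA]
            rw [if_pos]
            simp only [hsta, hend]
            omega
          rw [hfa, hcast]
          have hinv' : aInv para ks1 (i + 1) (i : Int) end_ kw2 :=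
            Or.inr ⟨hlen1, i, e2, rfl, hkw2, hend, by omega, hshift⟩
          rw [ih (i + 1) (i : Int) end_ kw2 hdrop' hinv', hend]
      · rw [if_neg hsc]
        rw [show ((i : Int) + 1).toNat = i + 1 from by omega]
        rw [aInner_char para (k0 :: ks1) (i + 1) 1 0 (le_refl 1)]
        rw [show (k0 :: ks1).drop 1 = ks1 from rfl]
        rw [hdrop']
        cases hg : gEnd ks1 rest (i + 1) with
        | none =>
          simp only [Option.map_none, List.nil_append]
          rw [hcast]
          exact ih (i + 1) sta end_ kw2 hdrop' (aInv_mono _ _ _ _ _ _ hinv)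
        | some en =>
          simp only [Option.map_some, List.singleton_append]
          rw [List.foldl_cons]
          by_cases himp : (en : Int) - (i : Int) < end_ - sta
          · rw [if_pos himp]
            have hfa : fA (sta, end_) ((i : Int), (en : Int)) = ((i : Int), (en : Int)) := by
              simp only [fA]; rw [if_pos himp]
            rw [hfa, hcast]
            have hg' : gEnd ks1 (para.drop (i + 1)) (i + 1) = some en := by rw [hdrop']; exact hg
            have hinv' : aInv para ks1 (i + 1) (i : Int) (en : Int)
                ((if (k0 :: ks1).length = 2 then en else 0 : Nat) : Int) := by
              by_cases h2 : (k0 :: ks1).length = 2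
              · rw [if_pos h2]
                exact Or.inr ⟨by simpa using h2, i, en, rfl, rfl, rfl, by omega, hg'⟩
              · rw [if_neg h2]
                exact Or.inl (by simp)
            exact ih (i + 1) (i : Int) (en : Int) _ hdrop' hinv'
          · rw [if_neg himp]
            have hfa : fA (sta, end_) ((i : Int), (en : Int)) = (sta, end_) := by
              simp only [fA]; rw [if_neg himp]
            rw [hfa, hcast]
            exact ih (i + 1) sta end_ kw2 hdrop' (aInv_mono _ _ _ _ _ _ hinv)
    · rw [if_pos (by simp [hw]), if_neg hw]
      simp only [List.nil_append]
      rw [hcast]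
      exact ih (i + 1) sta end_ kw2 hdrop' (aInv_mono _ _ _ _ _ _ hinv)

theorem aLoop_skip (para ks : List String) :
    ∀ (items : List (Int × String)) (sta end_ kw2 : Int),
      (∀ p ∈ items, p.2 ≠ ks.headD "") → aLoop para ks items sta end_ kw2 = (sta, end_) := by
  intro items
  induction items with
  | nil => intro sta end_ kw2 _; rw [aLoop]
  | cons p rest ih =>
    intro sta end_ kw2 h
    obtain ⟨i, w⟩ := p
    rw [aLoop, if_pos (h (i, w) List.mem_cons_self)]
    exact ih sta end_ kw2 (fun q hq => h q (List.mem_cons_of_mem _ hq))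

theorem bRec_skip (ks : List String) (n : Nat) :
    ∀ (ws : List String) (i : Nat), (∀ w ∈ ws, w ≠ ks.headD "") →
      (bRec ks n ws i).2 = (-1, (n : Int)) := by
  intro ws
  induction ws with
  | nil => intro i _; rw [bRec]
  | cons w rest ih =>
    intro i h
    rw [bRec]
    simp only
    rw [if_neg (by intro hx; exact h w List.mem_cons_self hx.2)]
    exact ih (i + 1) (fun q hq => h q (List.mem_cons_of_mem _ hq))

theorem aLoop_one (para ks : List String) (hk : ks.length = 1) :
    ∀ (items : List (Int × String)) (sta end_ : Int),
      (∀ p ∈ items, 0 ≤ p.1) → aLoop para ks items sta end_ 0 = (sta, end_) := by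
  intro items
  induction items with
  | nil => intro sta end_ _; rw [aLoop]
  | cons p rest ih =>
    intro sta end_ h
    obtain ⟨i, w⟩ := p
    rw [aLoop]
    have hinner : aInner para ks 1 (i + 1).toNat 0 = none := by
      rw [aInner, dif_neg]; omega
    by_cases hw : w ≠ ks.headD ""
    · rw [if_pos hw]
      exact ih sta end_ (fun q hq => h q (List.mem_cons_of_mem _ hq))
    · rw [if_neg hw, if_neg (by have := h (i, w) List.mem_cons_self; simp at this; omega), hinner]
      exact ih sta end_ (fun q hq => h q (List.mem_cons_of_mem _ hq))

theorem bRec_inv (ks : List String) (n : Nat) :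
    ∀ (ws : List String) (i : Nat),
      (bRec ks n ws i).2.1 ≤ (bRec ks n ws i).2.2 ∧
      ((ks.length = 1 ∧ ks.headD "" ∈ ws) → 0 ≤ (bRec ks n ws i).2.1) := by
  intro ws
  induction ws with
  | nil =>
    intro i
    rw [bRec]
    exact ⟨by simp, fun h => absurd h.2 (List.not_mem_nil)⟩
  | cons w rest ih =>
    intro i
    obtain ⟨h1, h2⟩ := ih (i + 1)
    rw [bRec]
    simp only
    by_cases hg : 0 < ks.length ∧ w = ks.headD ""
    · rw [if_pos hg]
      by_cases h1k : ks.length = 1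
      · rw [if_pos h1k]
        simp only []
        rw [if_pos (show ((i : Nat) : Int) - (i : Int) ≤ _ from by omega)]
        exact ⟨by omega, fun _ => by simp⟩
      · rw [if_neg h1k]
        cases hE : (bRec ks n rest (i + 1)).1.getD 1 none with
        | none =>
          exact ⟨h1, fun h => absurd h.1 h1k⟩
        | some e =>
          simp only []
          have he : i + 1 ≤ e := by
            have hK2 : 1 < ks.length := by omega
            rw [bRec_fst, PySem.List.getD_map_range _ _ _ _ hK2] at hE
            exact (gEnd_bound _ _ _ _ hE).1
          constructor
          · split_ifs with hc
            · simp only []; omega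
            · exact h1
          · intro h; exact absurd h.1 h1k
    · rw [if_neg hg]
      refine ⟨h1, ?_⟩
      rintro ⟨hk1, hmem⟩
      rcases List.mem_cons.mp hmem with h | h
      · exact absurd ⟨by omega, h.symm⟩ hg
      · exact h2 ⟨hk1, h⟩

-- ===== VERDICT (by name: the statement is the Claim_ definition above) =====
theorem find_smallest_sequentially_covering_subset_spec : Claim_unchanged_find_smallest_sequentially_covering_subset := by
  unfold Claim_unchanged_find_smallest_sequentially_covering_subset
  intro paragraph keywords hDom hPre hnD
  cases keywords with
  | nil =>
    rcases hPre with h | h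
    · exact absurd rfl h
    · subst h; rfl
  | cons k0 ks1 =>
    cases hks1 : ks1 with
    | nil =>
      subst hks1
      have hmem : k0 ∉ paragraph := by
        intro hm
        exact hnD ⟨by simp, by simpa using hm⟩
      rw [find_smallest_sequentially_covering_subset, find_smallest_sequentially_covering_subset_alt]
      rw [aLoop_skip _ _ _ _ _ _ (by
        intro p hp
        rcases (PySem.List.mem_enumerate_iff _ _ _).mp hp with ⟨k, hk, rfl⟩
        simp only [List.headD_cons]
        intro hx
        exact hmem (hx ▸ List.getElem_mem hk))]
      rw [bRec_skip _ _ _ _ (by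
        intro x hx hxx
        rw [List.headD_cons] at hxx
        exact hmem (hxx ▸ hx))]
    | cons k1 t =>
      subst hks1
      have hne : (k1 :: t) ≠ [] := by simp
      rw [find_smallest_sequentially_covering_subset, find_smallest_sequentially_covering_subset_alt]
      have hA : aLoop paragraph (k0 :: k1 :: t) (PySem.List.enumerate paragraph 0) (-1) (paragraph.length : Int) 0 =
          List.foldl fA (-1, (paragraph.length : Int)) (cands k0 (k1 :: t) paragraph 0) := by
        have h := aLoop_eq paragraph k0 (k1 :: t) hne paragraph 0 (-1) (paragraph.length : Int) 0 rfl (Or.inl rfl)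
        simpa using h
      rw [hA]
      rw [bRec_snd k0 (k1 :: t) hne, Rf_eq, foldl_fA]
      cases hb : bestM (cands k0 (k1 :: t) paragraph 0) with
      | none => simp [pickA, pickB]
      | some m =>
        have hm := cands_bound k0 (k1 :: t) paragraph 0 m (bestM_mem _ _ hb)
        simp only [Nat.cast_zero, zero_add] at hm
        simp only [pickA, pickB]
        rw [if_pos (by omega), if_pos (by omega)]

theorem find_smallest_sequentially_covering_subset_changed : Claim_changed_find_smallest_sequentially_covering_subset := by
  unfold Claim_changed_find_smallest_sequentially_covering_subset
  refine ⟨by decide, by decide, by decide, ?_, by decide, by decide⟩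
  show find_smallest_sequentially_covering_subset ["a"] ["a"] = (-1, 1)
  simp [find_smallest_sequentially_covering_subset, aLoop, aInner, PySem.List.enumerate]

theorem find_smallest_sequentially_covering_subset_tight : Claim_exact_find_smallest_sequentially_covering_subset := by
  unfold Claim_exact_find_smallest_sequentially_covering_subset
  intro paragraph keywords hDom hPre hD
  obtain ⟨hk1, hmem⟩ := hD
  have hA : find_smallest_sequentially_covering_subset paragraph keywords = (-1, (paragraph.length : Int)) := by
    rw [find_smallest_sequentially_covering_subset]
    refine aLoop_one paragraph keywords hk1 _ _ _ ?_
    intro p hp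
    rcases (PySem.List.mem_enumerate_iff _ _ _).mp hp with ⟨k, hk, rfl⟩
    simp
  have hB := (bRec_inv keywords paragraph.length paragraph 0).2 ⟨hk1, hmem⟩
  intro h
  rw [hA] at h
  have h1 := congrArg Prod.fst h
  rw [find_smallest_sequentially_covering_subset_alt] at h1
  simp only at h1
  omega
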